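-- pv_equiv track=rewrite | github.com/EYY7592/MidtermReport_ThreatHunter | agents/debate_engine.py | _get_analyst_risk
-- ===== SOURCE A (Python) =====
-- RISK_LEVELS: dict[str, int] = {
--     "LOW": 1,
--     "MEDIUM": 2,
--     "HIGH": 3,
--     "CRITICAL": 4,
-- }
--
-- def _get_analyst_risk(analyst_output: dict) -> str:
--     """從 Analyst 輸出提取整體風險等級"""
--     analysis = analyst_output.get("analysis", [])
--     if not analysis:
--         return "UNKNOWN"
--     # 取最高嚴重性
--     max_level = 0
--     max_name = "UNKNOWN"
--     for entry in analysis: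
--         sev = entry.get("severity") or entry.get("adjusted_risk", "MEDIUM")
--         level = RISK_LEVELS.get(sev, 0)
--         if level > max_level:
--             max_level = level
--             max_name = sev
--     return max_name
-- ===== SOURCE B (Python) =====
-- def _get_analyst_risk(analyst_output: dict) -> str:
--     """Idiomatic rewrite: collect the severity strings into a set, then return
--     the first known level name, scanned in descending order of severity."""
--     present = {
--         entry.get("severity") or entry.get("adjusted_risk", "MEDIUM")
--         for entry in analyst_output.get("analysis", [])
--     }
--     for name in ("CRITICAL", "HIGH", "MEDIUM", "LOW"):
--         if name in present:
--             return name
--     return "UNKNOWN"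
-- ===== Notes on version B (the rewrite author's own statement) =====
-- stated objective: idiomatic
-- what changed: Replaces the running (max_level, max_name) accumulator loop with building a set of the severity strings present and scanning the four known levels in descending order for the first one in the set.
import Mathlib
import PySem

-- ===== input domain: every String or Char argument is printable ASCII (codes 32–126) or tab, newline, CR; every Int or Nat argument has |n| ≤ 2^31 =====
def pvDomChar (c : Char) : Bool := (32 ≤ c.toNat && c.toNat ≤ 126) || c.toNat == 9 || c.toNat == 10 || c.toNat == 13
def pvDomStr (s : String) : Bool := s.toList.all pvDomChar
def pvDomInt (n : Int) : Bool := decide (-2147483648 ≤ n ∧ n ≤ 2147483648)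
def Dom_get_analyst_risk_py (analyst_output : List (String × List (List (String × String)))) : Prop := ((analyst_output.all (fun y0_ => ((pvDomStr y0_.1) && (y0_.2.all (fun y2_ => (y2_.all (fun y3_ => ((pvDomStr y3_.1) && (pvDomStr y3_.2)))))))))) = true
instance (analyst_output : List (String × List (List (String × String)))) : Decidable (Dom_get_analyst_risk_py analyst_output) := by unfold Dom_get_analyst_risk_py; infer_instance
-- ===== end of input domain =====

-- B replaces A's running (max_level, max_name) accumulator loop with a set of the present
-- severity strings, scanned against the known level names in descending order; objective: idiomatic.

-- ===== PORT A =====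
-- shared helper: the expression `entry.get("severity") or entry.get("adjusted_risk", "MEDIUM")`,
-- which appears verbatim in both Pythons (Python `or` falls through on None and on "")
def pvSev (entry : List (String × String)) : String :=
  match (PySem.Dict.mk entry).get? "severity" with
  | some v => if v = "" then (PySem.Dict.mk entry).getD "adjusted_risk" "MEDIUM" else v
  | none => (PySem.Dict.mk entry).getD "adjusted_risk" "MEDIUM"

def RISK_LEVELS : PySem.Dict String Int :=
  PySem.Dict.mk [("LOW", 1), ("MEDIUM", 2), ("HIGH", 3), ("CRITICAL", 4)]

def get_analyst_risk_py (analyst_output : List (String × List (List (String × String)))) : String :=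
  let analysis := (PySem.Dict.mk analyst_output).getD "analysis" []
  if analysis = [] then "UNKNOWN"
  else
    (analysis.foldl (fun (acc : Int × String) entry =>
        let sev := pvSev entry
        let level := RISK_LEVELS.getD sev 0
        if acc.1 < level then (level, sev) else acc) (0, "UNKNOWN")).2

-- ===== PORT B =====
def get_analyst_risk_py_alt (analyst_output : List (String × List (List (String × String)))) : String :=
  let present : PySem.Set String :=
    PySem.Set.ofList (((PySem.Dict.mk analyst_output).getD "analysis" []).map pvSev)
  match ["CRITICAL", "HIGH", "MEDIUM", "LOW"].find? (fun n => PySem.Set.contains present n) with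
  | some n => n
  | none => "UNKNOWN"

-- ===== PRECONDITION & SPEC =====
def Spec_get_analyst_risk_py (analyst_output : List (String × List (List (String × String)))) (out : String) : Prop := out = get_analyst_risk_py_alt analyst_output
instance (analyst_output : List (String × List (List (String × String)))) (out : String) : Decidable (Spec_get_analyst_risk_py analyst_output out) := by unfold Spec_get_analyst_risk_py; infer_instance

-- ===== CLAIM (what is proved, stated in full; the proofs are below) =====
def Claim_equal_get_analyst_risk_py : Prop := ∀ (analyst_output : List (String × List (List (String × String)))), Dom_get_analyst_risk_py analyst_output → Spec_get_analyst_risk_py analyst_output (get_analyst_risk_py analyst_output)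

-- ===== LEMMAS AND PROOFS =====

-- level of a severity string under RISK_LEVELS (proof-side abbreviation)
def pvLvl (s : String) : Int := RISK_LEVELS.getD s 0

-- canonical name of a level
def pvCanon (k : Int) : String :=
  if k = 4 then "CRITICAL" else if k = 3 then "HIGH" else if k = 2 then "MEDIUM"
  else if k = 1 then "LOW" else "UNKNOWN"

-- max level over a list of severity strings
def pvMax : List String → Int
  | [] => 0
  | s :: t => max (pvLvl s) (pvMax t)

theorem pvLvl_eq (s : String) :
    pvLvl s = if s = "CRITICAL" then 4 else if s = "HIGH" then 3
      else if s = "MEDIUM" then 2 else if s = "LOW" then 1 else 0 := by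
  by_cases h1 : s = "CRITICAL"; · subst h1; decide
  by_cases h2 : s = "HIGH"; · subst h2; decide
  by_cases h3 : s = "MEDIUM"; · subst h3; decide
  by_cases h4 : s = "LOW"; · subst h4; decide
  simp only [pvLvl, RISK_LEVELS, PySem.Dict.getD_eq_get?_getD, PySem.Dict.get?_mk_cons,
    beq_iff_eq, if_neg (Ne.symm h1), if_neg (Ne.symm h2), if_neg (Ne.symm h3),
    if_neg (Ne.symm h4), if_neg h1, if_neg h2, if_neg h3, if_neg h4]
  rfl

theorem pvLvl_nonneg (s : String) : 0 ≤ pvLvl s := by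
  rw [pvLvl_eq]; split_ifs <;> norm_num

theorem pvLvl_le_four (s : String) : pvLvl s ≤ 4 := by
  rw [pvLvl_eq]; split_ifs <;> norm_num

theorem pvCanon_lvl (s : String) (h : 0 < pvLvl s) : pvCanon (pvLvl s) = s := by
  rw [pvLvl_eq] at *
  split_ifs at * with h1 h2 h3 h4 <;> simp_all [pvCanon]

theorem pvMax_nonneg (l : List String) : 0 ≤ pvMax l := by
  induction l with
  | nil => simp [pvMax]
  | cons s t ih => simp only [pvMax]; exact le_max_of_le_right ih

theorem pvMax_le_four (l : List String) : pvMax l ≤ 4 := by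
  induction l with
  | nil => simp [pvMax]
  | cons s t ih => simp only [pvMax, max_le_iff]; exact ⟨pvLvl_le_four s, ih⟩

theorem lvl_le_pvMax (l : List String) (s : String) (h : s ∈ l) : pvLvl s ≤ pvMax l := by
  induction l with
  | nil => simp at h
  | cons a t ih =>
    rcases List.mem_cons.mp h with rfl | h
    · exact le_max_left _ _
    · exact le_max_of_le_right (ih h)

theorem pvMax_attained (l : List String) (h : 0 < pvMax l) : ∃ s ∈ l, pvLvl s = pvMax l := by
  induction l with
  | nil => simp [pvMax] at h
  | cons a t ih =>
    simp only [pvMax] at h ⊢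
    rcases le_total (pvMax t) (pvLvl a) with hle | hle
    · exact ⟨a, List.mem_cons_self, (max_eq_left hle).symm⟩
    · have ht : 0 < pvMax t := lt_of_lt_of_le h (max_le hle le_rfl)
      obtain ⟨s, hs, he⟩ := ih ht
      exact ⟨s, List.mem_cons_of_mem _ hs, by rw [he, max_eq_right hle]⟩

theorem mem_of_pvMax_eq (l : List String) (name : String) (hk : 0 < pvLvl name)
    (h : pvMax l = pvLvl name) : name ∈ l := by
  obtain ⟨s, hs, he⟩ := pvMax_attained l (h ▸ hk)
  have hsn : s = name := by
    have h1 : pvCanon (pvLvl s) = s := pvCanon_lvl s (by rw [he, h]; exact hk)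
    have h2 : pvCanon (pvLvl name) = name := pvCanon_lvl name hk
    rw [← h1, he, h, h2]
  exact hsn ▸ hs

-- characterisation of A's loop: the accumulator ends at the max level and its canonical name
theorem foldA_char (l : List String) : ∀ (m : Int) (n : String), 0 ≤ m →
    (l.foldl (fun (acc : Int × String) s => if acc.1 < pvLvl s then (pvLvl s, s) else acc) (m, n))
      = (max m (pvMax l), if m < pvMax l then pvCanon (pvMax l) else n) := by
  induction l with
  | nil =>
    intro m n hm
    simp only [List.foldl_nil, pvMax]
    rw [max_eq_left hm, if_neg (not_lt.mpr hm)]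
  | cons s t ih =>
    intro m n hm
    simp only [List.foldl_cons, pvMax]
    by_cases hms : m < pvLvl s
    · rw [if_pos hms, ih (pvLvl s) s (pvLvl_nonneg s)]
      have hcs : pvCanon (pvLvl s) = s := pvCanon_lvl s (lt_of_le_of_lt hm hms)
      rcases le_total (pvLvl s) (pvMax t) with h | h
      · rw [max_eq_right h, max_eq_right (le_of_lt (lt_of_lt_of_le hms h))]
        by_cases hst : pvLvl s < pvMax t
        · rw [if_pos hst, if_pos (hms.trans hst)]
        · have he : pvMax t = pvLvl s := le_antisymm (not_lt.mp hst) h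
          rw [if_neg hst, if_pos (he ▸ hms), he, hcs]
      · rw [max_eq_left h, max_eq_right (le_of_lt hms),
          if_neg (not_lt.mpr h), if_pos hms, hcs]
    · rw [if_neg hms, ih m n hm]
      have hsm : pvLvl s ≤ m := not_lt.mp hms
      rcases le_total (pvLvl s) (pvMax t) with h | h
      · rw [max_eq_right h]
      · rw [max_eq_left h, max_eq_left hsm, max_eq_left (h.trans hsm),
          if_neg (not_lt.mpr (h.trans hsm)), if_neg hms]

-- ===== VERDICT (by name: the statement is the Claim_ definition above) =====
theorem get_analyst_risk_py_spec : Claim_equal_get_analyst_risk_py := by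
  intro ao _
  unfold Spec_get_analyst_risk_py get_analyst_risk_py get_analyst_risk_py_alt
  set analysis := (PySem.Dict.mk ao).getD "analysis" [] with hana
  set sevs := analysis.map pvSev with hsevs
  have hlC : pvLvl "CRITICAL" = 4 := by decide
  have hlH : pvLvl "HIGH" = 3 := by decide
  have hlM : pvLvl "MEDIUM" = 2 := by decide
  have hlL : pvLvl "LOW" = 1 := by decide
  have hA : (if analysis = [] then "UNKNOWN"
      else (analysis.foldl (fun (acc : Int × String) entry =>
        let sev := pvSev entry
        let level := RISK_LEVELS.getD sev 0
        if acc.1 < level then (level, sev) else acc) (0, "UNKNOWN")).2) = pvCanon (pvMax sevs) := by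
    split_ifs with he
    · rw [hsevs, he]; rfl
    · have hfold : analysis.foldl (fun (acc : Int × String) entry =>
          let sev := pvSev entry
          let level := RISK_LEVELS.getD sev 0
          if acc.1 < level then (level, sev) else acc) (0, "UNKNOWN")
          = sevs.foldl (fun (acc : Int × String) s => if acc.1 < pvLvl s then (pvLvl s, s) else acc) (0, "UNKNOWN") := by
        rw [hsevs, List.foldl_map]; rfl
      rw [hfold, foldA_char sevs 0 "UNKNOWN" le_rfl]
      by_cases h0 : 0 < pvMax sevs
      · rw [if_pos h0]
      · rw [if_neg h0]
        have h1 := pvMax_nonneg sevs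
        have h2 : pvMax sevs = 0 := by omega
        rw [h2]; rfl
  rw [hA]
  by_cases hc : "CRITICAL" ∈ sevs
  · have h4 : pvMax sevs = 4 := le_antisymm (pvMax_le_four sevs)
      (hlC ▸ lvl_le_pvMax sevs _ hc)
    rw [h4]
    simp [List.find?, hc, pvCanon]
  · have hne4 : pvMax sevs ≠ 4 := fun h =>
      hc (mem_of_pvMax_eq sevs "CRITICAL" (by rw [hlC]; norm_num) (by rw [h, hlC]))
    by_cases hh : "HIGH" ∈ sevs
    · have h3 : pvMax sevs = 3 := by
        have := hlH ▸ lvl_le_pvMax sevs _ hh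
        have := pvMax_le_four sevs
        omega
      rw [h3]
      simp [List.find?, hc, hh, pvCanon]
    · have hne3 : pvMax sevs ≠ 3 := fun h =>
        hh (mem_of_pvMax_eq sevs "HIGH" (by rw [hlH]; norm_num) (by rw [h, hlH]))
      by_cases hm : "MEDIUM" ∈ sevs
      · have h2 : pvMax sevs = 2 := by
          have := hlM ▸ lvl_le_pvMax sevs _ hm
          have := pvMax_le_four sevs
          omega
        rw [h2]
        simp [List.find?, hc, hh, hm, pvCanon]
      · have hne2 : pvMax sevs ≠ 2 := fun h =>
          hm (mem_of_pvMax_eq sevs "MEDIUM" (by rw [hlM]; norm_num) (by rw [h, hlM]))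
        by_cases hl : "LOW" ∈ sevs
        · have h1 : pvMax sevs = 1 := by
            have := hlL ▸ lvl_le_pvMax sevs _ hl
            have := pvMax_le_four sevs
            omega
          rw [h1]
          simp [List.find?, hc, hh, hm, hl, pvCanon]
        · have h0 : pvMax sevs = 0 := by
            by_contra hne
            have hpos : 0 < pvMax sevs := lt_of_le_of_ne (pvMax_nonneg sevs) (Ne.symm hne)
            obtain ⟨s, hs, he⟩ := pvMax_attained sevs hpos
            have hb := pvMax_le_four sevs
            rw [pvLvl_eq] at he
            split_ifs at he with e1 e2 e3 e4
            · exact hc (e1 ▸ hs)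
            · exact hh (e2 ▸ hs)
            · exact hm (e3 ▸ hs)
            · exact hl (e4 ▸ hs)
            · omega
          rw [h0]
          simp [List.find?, hc, hh, hm, hl, pvCanon]
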